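-- pv_equiv track=rewrite | github.com/tbarabosch/apihash_to_yara | hash_functions.py | rol9XorHash32
-- ===== SOURCE A (Python) =====
-- ROTATE_BITMASK = {
--     8  : 0xff,
--     16 : 0xffff,
--     32 : 0xffffffff,
--     64 : 0xffffffffffffffff,
-- }
--
-- def rol(inVal, numShifts, dataSize=32):
--     '''rotate left instruction emulation'''
--     if numShifts == 0:
--         return inVal
--     if (numShifts < 0) or (numShifts > dataSize):
--         raise ValueError('Bad numShifts')
--     if (dataSize != 8) and (dataSize != 16) and (dataSize != 32) and (dataSize != 64):
--         raise ValueError('Bad dataSize')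
--     bitMask = ROTATE_BITMASK[dataSize]
--     currVal = inVal
--     return bitMask & ((inVal << numShifts) | (inVal >> (dataSize-numShifts)))
--
-- def rol9XorHash32(inString,fName):
--     if inString is None:
--         return 0
--     val = 0
--     for i in inString:
--         val = rol(val, 0x9, 32)
--         val = val ^ ord(i)
--     return val
-- ===== SOURCE B (Python) =====
-- def rol9XorHash32(inString, fName):
--     # Each character contributes independently: rol is linear over XOR, so the
--     # hash is the XOR of ord(ch) rotated left by 9*(distance from the end) mod 32.
--     if inString is None:
--         return 0
--     n = len(inString)
--     h = 0
--     for p, ch in enumerate(inString):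
--         s = (9 * (n - 1 - p)) % 32
--         v = ord(ch)
--         h ^= ((v << s) | (v >> (32 - s))) & 0xffffffff
--     return h
-- ===== Notes on version B (the rewrite author's own statement) =====
-- stated objective: alternative
-- what changed: Replaces A's rolling accumulator (rotate the running state by 9 before each XOR) with a one-pass XOR of each character independently rotated left by 9*(len-1-index) mod 32, exploiting that rotation is XOR-linear and composes.
import Mathlib
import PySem

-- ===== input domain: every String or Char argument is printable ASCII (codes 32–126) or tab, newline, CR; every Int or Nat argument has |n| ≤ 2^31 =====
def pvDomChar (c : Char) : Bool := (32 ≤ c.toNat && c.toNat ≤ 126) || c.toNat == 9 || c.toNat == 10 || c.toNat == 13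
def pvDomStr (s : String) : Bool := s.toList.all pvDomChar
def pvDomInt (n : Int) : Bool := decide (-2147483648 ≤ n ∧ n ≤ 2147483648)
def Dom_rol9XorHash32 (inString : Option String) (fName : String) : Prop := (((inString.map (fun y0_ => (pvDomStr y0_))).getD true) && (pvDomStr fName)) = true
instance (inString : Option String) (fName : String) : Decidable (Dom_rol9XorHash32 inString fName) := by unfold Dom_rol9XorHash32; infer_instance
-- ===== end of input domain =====

-- B replaces A's rolling accumulator by an XOR of independently rotated characters
-- (rol is linear over XOR); objective: alternative decomposition, same cost.

-- ===== PORT A =====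
-- rol: ValueError branches return none (never reached from rol9XorHash32's call rol(val, 9, 32))
def pvRolA (inVal : Int) (numShifts : Int) (dataSize : Int) : Option Int :=
  if numShifts = 0 then some inVal
  else if numShifts < 0 ∨ numShifts > dataSize then none
  else if dataSize ≠ 8 ∧ dataSize ≠ 16 ∧ dataSize ≠ 32 ∧ dataSize ≠ 64 then none
  else
    let bitMask : Int :=
      if dataSize = 8 then 0xff else if dataSize = 16 then 0xffff
      else if dataSize = 32 then 0xffffffff else 0xffffffffffffffff
    some (PySem.Int.band bitMask (PySem.Int.bor (inVal <<< numShifts.toNat) (inVal >>> (dataSize - numShifts).toNat)))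

def rol9XorHash32 (inString : Option String) (fName : String) : Int :=
  match inString with
  | none => 0
  | some s =>
    s.toList.foldl (fun val c =>
      PySem.Int.bxor
        (match pvRolA val 9 32 with
         | some r => r
         | none => 0)  -- unreachable: rol(·, 9, 32) never raises
        (c.toNat : Int)) 0

-- ===== PORT B =====
def rol9XorHash32_alt (inString : Option String) (fName : String) : Int :=
  match inString with
  | none => 0
  | some str =>
    let n : Int := PySem.Str.len str
    str.toList.zipIdx.foldl (fun h x =>
      let s : Int := PySem.Int.mod (9 * (n - 1 - (x.2 : Int))) 32
      let v : Int := (x.1.toNat : Int)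
      PySem.Int.bxor h
        (PySem.Int.band (PySem.Int.bor (v <<< s.toNat) (v >>> (32 - s).toNat)) 0xffffffff)) 0

-- ===== PRECONDITION & SPEC =====
def Spec_rol9XorHash32 (inString : Option String) (fName : String) (out : Int) : Prop := out = rol9XorHash32_alt inString fName
instance (inString : Option String) (fName : String) (out : Int) : Decidable (Spec_rol9XorHash32 inString fName out) := by unfold Spec_rol9XorHash32; infer_instance

-- ===== CLAIM (what is proved, stated in full; the proofs are below) =====
def Claim_equal_rol9XorHash32 : Prop := ∀ (inString : Option String) (fName : String), Dom_rol9XorHash32 inString fName → Spec_rol9XorHash32 inString fName (rol9XorHash32 inString fName)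

-- ===== LEMMAS AND PROOFS =====

-- Nat-level model: 32-bit rotate-left and the two folds.
def rotN (s v : Nat) : Nat := ((v <<< s) ||| (v >>> (32 - s))) &&& 4294967295

def stepA (v : Nat) (c : Char) : Nat := rotN 9 v ^^^ c.toNat

def specN : List Char → Nat
  | [] => 0
  | c :: t => rotN ((9 * t.length) % 32) c.toNat ^^^ specN t

theorem testBit_of_ge {v n i : Nat} (h : v < 2^n) (hi : n ≤ i) : v.testBit i = false :=
  Nat.testBit_eq_false_of_lt (lt_of_lt_of_le h (Nat.pow_le_pow_right (by norm_num) hi))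

theorem rotN_testBit {s : Nat} (v i : Nat) (hs : s < 32) (hv : v < 2^32) :
    (rotN s v).testBit i = (decide (i < 32) && v.testBit ((i + 32 - s) % 32)) := by
  have hmask : (4294967295 : Nat) = 2^32 - 1 := by norm_num
  unfold rotN
  rw [hmask]
  simp only [Nat.testBit_and, Nat.testBit_or, Nat.testBit_shiftLeft, Nat.testBit_shiftRight,
    Nat.testBit_two_pow_sub_one]
  by_cases hi : i < 32
  · by_cases his : s ≤ i
    · have h1 : v.testBit (32 - s + i) = false := testBit_of_ge hv (by omega)
      have h2 : (i + 32 - s) % 32 = i - s := by omega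
      simp [his, hi, h1, h2]
    · have h2 : (i + 32 - s) % 32 = 32 - s + i := by omega
      simp [his, hi, h2]
  · simp [hi]

theorem rotN_lt (s v : Nat) : rotN s v < 2^32 := by
  have h : (4294967295 : Nat) < 2^32 := by norm_num
  exact Nat.and_lt_two_pow _ h

theorem rotN_zero_val (s : Nat) : rotN s 0 = 0 := by
  unfold rotN
  simp

theorem rotN_zero {v : Nat} (hv : v < 2^32) : rotN 0 v = v := by
  apply Nat.eq_of_testBit_eq
  intro i
  rw [rotN_testBit v i (by norm_num) hv]
  by_cases hi : i < 32
  · simp only [hi, decide_true, Bool.true_and]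
    have h0 : (i + 32 - 0) % 32 = i := by omega
    rw [h0]
  · have h0 := testBit_of_ge hv (show 32 ≤ i by omega)
    simp [hi, h0]

theorem rotN_xor {s a b : Nat} (hs : s < 32) (ha : a < 2^32) (hb : b < 2^32) :
    rotN s (a ^^^ b) = rotN s a ^^^ rotN s b := by
  apply Nat.eq_of_testBit_eq
  intro i
  rw [Nat.testBit_xor, rotN_testBit _ i hs (Nat.xor_lt_two_pow ha hb),
    rotN_testBit a i hs ha, rotN_testBit b i hs hb, Nat.testBit_xor]
  by_cases hi : i < 32 <;> simp [hi]

theorem rotN_rotN {s v : Nat} (hs : s < 32) (hv : v < 2^32) :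
    rotN s (rotN 9 v) = rotN ((s + 9) % 32) v := by
  apply Nat.eq_of_testBit_eq
  intro i
  rw [rotN_testBit _ i hs (rotN_lt 9 v), rotN_testBit v i (by omega) hv]
  by_cases hi : i < 32
  · rw [rotN_testBit v _ (by norm_num) hv]
    have h1 : (i + 32 - s) % 32 < 32 := by omega
    simp only [hi, h1, decide_true, Bool.true_and]
    congr 1
    omega
  · simp [hi]

theorem char_lt (c : Char) : c.toNat < 2^32 := by
  have h : c.toNat < 4294967296 := c.val.toNat_lt
  norm_num
  omega

-- A's rolling fold, in Nat, is: rotate the seed all the way and XOR the spec.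
theorem mainA : ∀ (cs : List Char) (v : Nat), v < 2^32 →
    cs.foldl stepA v = rotN ((9 * cs.length) % 32) v ^^^ specN cs := by
  intro cs
  induction cs with
  | nil =>
    intro v hv
    simp [specN, rotN_zero hv]
  | cons c t ih =>
    intro v hv
    have hstep : stepA v c < 2^32 := Nat.xor_lt_two_pow (rotN_lt _ _) (char_lt c)
    have hs : (9 * t.length) % 32 < 32 := by omega
    rw [List.foldl_cons, ih _ hstep]
    unfold stepA
    rw [rotN_xor hs (rotN_lt _ _) (char_lt c), rotN_rotN hs hv]
    have hmod : ((9 * t.length) % 32 + 9) % 32 = (9 * (c :: t).length) % 32 := by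
      simp only [List.length_cons]; omega
    rw [hmod, specN, Nat.xor_assoc]

-- Bridge: A's Int step on a cast equals the Nat step, cast.
theorem bridge_stepA (v : Nat) (c : Char) :
    PySem.Int.bxor
      (match pvRolA (v : Int) 9 32 with
       | some r => r
       | none => 0) (c.toNat : Int) = ((stepA v c : Nat) : Int) := by
  have h1 : pvRolA (v : Int) 9 32 = some ((rotN 9 v : Nat) : Int) := by
    unfold pvRolA rotN
    norm_num
    rw [show ((9 : Int)).toNat = 9 from rfl, show ((23 : Int)).toNat = 23 from rfl]
    rw [show ((4294967295 : Int) = ((4294967295 : Nat) : Int)) from by norm_num]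
    rw [show (((v : Int) <<< (9 : Nat)) = ((v <<< 9 : Nat) : Int)) from by simp]
    rw [show (((v : Int) >>> (23 : Nat)) = ((v >>> 23 : Nat) : Int)) from by simp]
    rw [PySem.Int.bor_natCast, PySem.Int.band_natCast]
    rw [Nat.land_comm]
  rw [h1]
  unfold stepA
  rw [show ((c.toNat : Int) = ((c.toNat : Nat) : Int)) from rfl]
  exact PySem.Int.bxor_natCast _ _

-- Bridge for A's whole fold.
theorem bridgeA : ∀ (cs : List Char) (v : Nat),
    cs.foldl (fun val c =>
      PySem.Int.bxor
        (match pvRolA val 9 32 with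
         | some r => r
         | none => 0)
        (c.toNat : Int)) ((v : Nat) : Int) = ((cs.foldl stepA v : Nat) : Int) := by
  intro cs
  induction cs with
  | nil => intro v; rfl
  | cons c t ih =>
    intro v
    rw [List.foldl_cons, List.foldl_cons, bridge_stepA, ih]

-- Bridge for B's fold: with n = k + length cs, the Int fold over zipIdx k computes
-- acc XOR specN cs.
theorem bridgeB : ∀ (cs : List Char) (k : Nat) (n : Int) (acc : Nat),
    n = (k : Int) + cs.length →
    (cs.zipIdx k).foldl (fun h x =>
      PySem.Int.bxor h
        (PySem.Int.band
          (PySem.Int.bor ((x.1.toNat : Int) <<< (PySem.Int.mod (9 * (n - 1 - (x.2 : Int))) 32).toNat)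
           ((x.1.toNat : Int) >>> ((32 : Int) - PySem.Int.mod (9 * (n - 1 - (x.2 : Int))) 32).toNat))
          0xffffffff)) ((acc : Nat) : Int) = ((acc ^^^ specN cs : Nat) : Int) := by
  intro cs
  induction cs with
  | nil => intro k n acc h; simp [specN]
  | cons c t ih =>
    intro k n acc h
    have hz : (c :: t).zipIdx k = (c, k) :: t.zipIdx (k + 1) := by simp [List.zipIdx]
    rw [hz, List.foldl_cons]
    have hn : n - 1 - (k : Int) = ((t.length : Nat) : Int) := by
      simp only [List.length_cons] at h; push_cast at h ⊢; omega
    have hmod : PySem.Int.mod (9 * (n - 1 - (k : Int))) 32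
        = (((9 * t.length) % 32 : Nat) : Int) := by
      rw [hn, show ((9 : Int) * (t.length : Int) = ((9 * t.length : Nat) : Int)) from by push_cast; ring,
        show ((32 : Int) = ((32 : Nat) : Int)) from rfl, PySem.Int.mod_natCast]
    have hs : (9 * t.length) % 32 < 32 := by omega
    have hterm : PySem.Int.band
        (PySem.Int.bor ((c.toNat : Int) <<< (PySem.Int.mod (9 * (n - 1 - (k : Int))) 32).toNat)
         ((c.toNat : Int) >>> ((32 : Int) - PySem.Int.mod (9 * (n - 1 - (k : Int))) 32).toNat))
        0xffffffff = ((rotN ((9 * t.length) % 32) c.toNat : Nat) : Int) := by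
      rw [hmod]
      have h32 : ((32 : Int) - (((9 * t.length) % 32 : Nat) : Int)).toNat
          = 32 - (9 * t.length) % 32 := by omega
      have hsN : ((((9 * t.length) % 32 : Nat) : Int)).toNat = (9 * t.length) % 32 := by omega
      rw [h32, hsN]
      unfold rotN
      rw [show (((c.toNat : Int) <<< ((9 * t.length) % 32)) = ((c.toNat <<< ((9 * t.length) % 32) : Nat) : Int)) from by simp]
      rw [show (((c.toNat : Int) >>> (32 - (9 * t.length) % 32)) = ((c.toNat >>> (32 - (9 * t.length) % 32) : Nat) : Int)) from by simp]
      rw [PySem.Int.bor_natCast]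
      rw [show ((4294967295 : Int) = ((4294967295 : Nat) : Int)) from by norm_num]
      exact PySem.Int.band_natCast _ _
    rw [hterm, PySem.Int.bxor_natCast]
    rw [ih (k + 1) n (acc ^^^ rotN ((9 * t.length) % 32) c.toNat)
      (by simp only [List.length_cons] at h; push_cast at h ⊢; omega)]
    rw [specN, ← Nat.xor_assoc]

-- ===== VERDICT (by name: the statement is the Claim_ definition above) =====
theorem rol9XorHash32_spec : Claim_equal_rol9XorHash32 := by
  intro inString fName _
  unfold Spec_rol9XorHash32 rol9XorHash32 rol9XorHash32_alt
  match inString with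
  | none => rfl
  | some s =>
    simp only
    have hlen : PySem.Str.len s = ((0 : Nat) : Int) + s.toList.length := by
      simp [PySem.Str.len_eq]
    have hA := bridgeA s.toList 0
    have hB := bridgeB s.toList 0 (PySem.Str.len s) 0 hlen
    rw [Nat.cast_zero] at hA hB
    rw [hA, hB, mainA s.toList 0 (by norm_num), rotN_zero_val, Nat.zero_xor]
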